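-- pv_equiv track=rewrite | github.com/ejbarton5554/990-toolkit | dashboard.py | build_category_summary
-- ===== SOURCE A (Python) =====
-- def build_category_summary(field_to_cats):
--     # type: (Dict[str, List[List[str]]]) -> str
--     """Build compact category hierarchy with field counts for Stage 1."""
--     path_counts = {}  # type: Dict[str, int]
--     for paths in field_to_cats.values():
--         for path in paths:
--             key = " > ".join(path)
--             path_counts[key] = path_counts.get(key, 0) + 1
--     lines = []
--     for path_str, cnt in sorted(path_counts.items()):
--         lines.append("{} ({} fields)".format(path_str, cnt))
--     return "\n".join(lines)
-- ===== SOURCE B (Python) =====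
-- def build_category_summary(field_to_cats):
--     # type: (Dict[str, List[List[str]]]) -> str
--     """Sort all joined paths once, then emit one line per run of equal keys."""
--     keys = sorted(" > ".join(path) for paths in field_to_cats.values() for path in paths)
--     groups = []
--     i = 0
--     n = len(keys)
--     while i < n:
--         j = i + 1
--         while j < n and keys[j] == keys[i]:
--             j += 1
--         groups.append((keys[i], j - i))
--         i = j
--     return "\n".join("{} ({} fields)".format(k, c) for k, c in groups)
-- ===== Notes on version B (the rewrite author's own statement) =====
-- stated objective: alternative
-- what changed: Replaces A's dict-based counting (hash map of key counts, then sorting the items) by flattening all joined paths into one list, sorting that list, and emitting one line per run of equal keys with a two-index scan.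
import Mathlib
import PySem

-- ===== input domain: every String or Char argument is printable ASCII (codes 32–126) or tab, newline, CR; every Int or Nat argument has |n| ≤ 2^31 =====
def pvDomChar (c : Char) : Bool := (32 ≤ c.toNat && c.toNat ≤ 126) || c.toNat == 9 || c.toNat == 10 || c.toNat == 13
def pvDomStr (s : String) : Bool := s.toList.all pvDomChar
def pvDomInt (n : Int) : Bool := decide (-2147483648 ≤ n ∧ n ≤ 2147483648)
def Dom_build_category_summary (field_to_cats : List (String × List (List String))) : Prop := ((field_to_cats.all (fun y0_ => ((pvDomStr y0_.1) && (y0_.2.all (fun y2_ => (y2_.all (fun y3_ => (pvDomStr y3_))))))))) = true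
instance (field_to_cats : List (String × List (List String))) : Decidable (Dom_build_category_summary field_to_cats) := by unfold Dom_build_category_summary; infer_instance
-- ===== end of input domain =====

-- B replaces A's dict of counts by sort-then-group over the flattened key list: an alternative strategy of similar cost (return value only; neither mutates its argument).

-- shared helper: "{} ({} fields)".format(k, c)
def pvFmt (k : String) (c : Int) : String := PySem.Str.join "" [k, " (", PySem.Int.toStr c, " fields)"]

-- ===== PORT A =====
def build_category_summary (field_to_cats : List (String × List (List String))) : String :=
  let path_counts : PySem.Dict String Int :=
    field_to_cats.foldl (fun pc kv =>
      kv.2.foldl (fun pc path =>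
        let key := PySem.Str.join " > " path
        pc.insert key (pc.getD key 0 + 1)) pc) PySem.Dict.empty
  let lines : List String :=
    (PySem.List.sorted2 path_counts.items (fun p => p.1) (fun p => p.2)).foldl
      (fun acc p => acc ++ [pvFmt p.1 p.2]) []
  PySem.Str.join "\n" lines

-- ===== PORT B =====
-- the two-index while loop: one (key, run length) group per run of equal sorted keys
def pvRuns : List String → List (String × Int)
  | [] => []
  | k :: rest =>
      (k, 1 + ((rest.takeWhile (fun x => x == k)).length : Int)) ::
        pvRuns (rest.dropWhile (fun x => x == k))
termination_by xs => xs.length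
decreasing_by exact Nat.lt_succ_of_le (List.length_dropWhile_le _ _)

def build_category_summary_alt (field_to_cats : List (String × List (List String))) : String :=
  let keys := PySem.List.sorted
    (field_to_cats.flatMap (fun kv => kv.2.map (fun path => PySem.Str.join " > " path)))
    (fun x => x) false
  PySem.Str.join "\n" ((pvRuns keys).map (fun p => pvFmt p.1 p.2))

-- ===== PRECONDITION & SPEC =====
def Spec_build_category_summary (field_to_cats : List (String × List (List String))) (out : String) : Prop := out = build_category_summary_alt field_to_cats
instance (field_to_cats : List (String × List (List String))) (out : String) : Decidable (Spec_build_category_summary field_to_cats out) := by unfold Spec_build_category_summary; infer_instance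

-- ===== CLAIM (what is proved, stated in full; the proofs are below) =====
def Claim_equal_build_category_summary : Prop := ∀ (field_to_cats : List (String × List (List String))), Dom_build_category_summary field_to_cats → Spec_build_category_summary field_to_cats (build_category_summary field_to_cats)

-- ===== LEMMAS AND PROOFS =====

-- insertBy only looks at comparisons of the inserted element against list members
theorem pv_insertBy_congr {α : Type} (f g : α → α → Bool) (x : α) (ys : List α)
    (h : ∀ b ∈ ys, f x b = g x b) :
    PySem.List.insertBy f x ys = PySem.List.insertBy g x ys := by
  induction ys with
  | nil => rfl
  | cons y ys ih =>
      simp only [PySem.List.insertBy, h y (List.mem_cons_self)]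
      split
      · rfl
      · rw [ih (fun b hb => h b (List.mem_cons_of_mem _ hb))]

theorem pv_foldl_insertBy_congr {α : Type} (f g : α → α → Bool) (xs acc : List α)
    (h : ∀ a, (a ∈ xs ∨ a ∈ acc) → ∀ b, (b ∈ xs ∨ b ∈ acc) → f a b = g a b) :
    xs.foldl (fun acc x => PySem.List.insertBy f x acc) acc
      = xs.foldl (fun acc x => PySem.List.insertBy g x acc) acc := by
  induction xs generalizing acc with
  | nil => rfl
  | cons x xs ih =>
      simp only [List.foldl_cons]
      rw [pv_insertBy_congr f g x acc
            (fun b hb => h x (Or.inl List.mem_cons_self) b (Or.inr hb))]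
      exact ih _ (fun a ha b hb => by
        apply h
        · rcases ha with ha | ha
          · exact Or.inl (List.mem_cons_of_mem _ ha)
          · rcases (PySem.List.mem_insertBy g x a acc).1 ha with rfl | ha
            · exact Or.inl List.mem_cons_self
            · exact Or.inr ha
        · rcases hb with hb | hb
          · exact Or.inl (List.mem_cons_of_mem _ hb)
          · rcases (PySem.List.mem_insertBy g x b acc).1 hb with rfl | hb
            · exact Or.inl List.mem_cons_self
            · exact Or.inr hb)

-- Python's sorted(items) on (str, int) pairs with pairwise-distinct firsts sorts by the first component
theorem pv_sorted2_eq_sorted_fst (xs : List (String × Int))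
    (hinj : ∀ a ∈ xs, ∀ b ∈ xs, a.1 = b.1 → a = b) :
    PySem.List.sorted2 xs (fun p => p.1) (fun p => p.2)
      = PySem.List.sorted xs (fun p => p.1) := by
  show xs.foldl (fun acc x => PySem.List.insertBy _ x acc) []
      = xs.foldl (fun acc x => PySem.List.insertBy _ x acc) []
  apply pv_foldl_insertBy_congr
  intro a ha b hb
  simp only [List.mem_nil_iff, or_false] at ha hb
  by_cases h1 : a.1 < b.1
  · simp [h1]
  · by_cases h2 : b.1 < a.1
    · simp [h1, h2]
    · have : a.1 = b.1 := le_antisymm (not_lt.1 h2) (not_lt.1 h1)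
      have : a = b := hinj a ha b hb this
      subst this
      simp

-- every element dropped past a run of k's in a (≤)-pairwise list is strictly above k
theorem pv_dropWhile_gt (k : String) (rest : List String)
    (hle : ∀ x ∈ rest, k ≤ x) (hp : rest.Pairwise (· ≤ ·)) :
    ∀ x ∈ rest.dropWhile (fun x => x == k), k < x := by
  induction rest with
  | nil => simp
  | cons r rs ih =>
      rw [List.dropWhile_cons]
      split
      · next hr =>
          exact ih (fun x hx => hle x (List.mem_cons_of_mem _ hx)) (List.Pairwise.sublist (List.sublist_cons_self _ _) hp)
      · next hr =>
          have hkr : k < r := lt_of_le_of_ne (hle r List.mem_cons_self) (by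
            intro h; exact hr (by simp [h]))
          intro x hx
          rcases List.mem_cons.1 hx with rfl | hx
          · exact hkr
          · exact lt_of_lt_of_le hkr ((List.pairwise_cons.1 hp).1 x hx)

-- characterisation of pvRuns on a (≤)-pairwise list
theorem pv_pvRuns_char (S : List String) (hp : S.Pairwise (· ≤ ·)) :
    (∀ p ∈ pvRuns S, p.2 = (S.count p.1 : Int)) ∧
    (∀ x, x ∈ (pvRuns S).map Prod.fst ↔ x ∈ S) ∧
    ((pvRuns S).map Prod.fst).Pairwise (· < ·) := by
  induction S using pvRuns.induct with
  | case1 => simp [pvRuns]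
  | case2 k rest ih =>
      have hle : ∀ x ∈ rest, k ≤ x := (List.pairwise_cons.1 hp).1
      have hprest : rest.Pairwise (· ≤ ·) := (List.pairwise_cons.1 hp).2
      have hgt := pv_dropWhile_gt k rest hle hprest
      have hp' : (rest.dropWhile (fun x => x == k)).Pairwise (· ≤ ·) :=
        List.Pairwise.sublist (List.dropWhile_sublist _) hprest
      obtain ⟨ih1, ih2, ih3⟩ := ih hp'
      have hrest : rest = rest.takeWhile (fun x => x == k) ++ rest.dropWhile (fun x => x == k) :=
        (List.takeWhile_append_dropWhile).symm
      have hrun : ∀ x ∈ rest.takeWhile (fun x => x == k), x = k := by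
        intro x hx
        have hx' : (x == k) = true := List.mem_takeWhile_imp (p := fun y => y == k) hx
        exact eq_of_beq hx'
      have h1 : (rest.takeWhile (fun x => x == k)).count k
          = (rest.takeWhile (fun x => x == k)).length :=
        List.count_eq_length.2 (fun b hb => (hrun b hb).symm)
      have h2 : (rest.dropWhile (fun x => x == k)).count k = 0 :=
        List.count_eq_zero.2 (fun h => absurd (hgt k h) (lt_irrefl k))
      have hcount_k : (k :: rest).count k
          = 1 + (rest.takeWhile (fun x => x == k)).length := by
        rw [List.count_cons_self]
        conv_lhs => rw [hrest]
        rw [List.count_append, h1, h2]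
        omega
      simp only [pvRuns]
      refine ⟨?_, ?_, ?_⟩
      · intro p hpmem
        rcases List.mem_cons.1 hpmem with rfl | hpmem
        · simp only [hcount_k]; push_cast; ring
        · have hmem : p.1 ∈ rest.dropWhile (fun x => x == k) :=
            (ih2 p.1).1 (List.mem_map_of_mem hpmem)
          have hpk : p.1 ≠ k := ne_of_gt (hgt _ hmem)
          have h3 : (k :: rest).count p.1 = (rest.dropWhile (fun x => x == k)).count p.1 := by
            have hc : List.count p.1 (k :: rest) = List.count p.1 rest := by
              simp [Ne.symm hpk]
            rw [hc]
            conv_lhs => rw [hrest]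
            rw [List.count_append,
              List.count_eq_zero.2 (fun h => hpk (hrun _ h))]
            omega
          rw [ih1 p hpmem, h3]
      · intro x
        simp only [List.map_cons, List.mem_cons, ih2]
        constructor
        · rintro (rfl | hx)
          · exact Or.inl rfl
          · exact Or.inr ((hrest ▸ List.mem_append_right _) hx)
        · rintro (rfl | hx)
          · exact Or.inl rfl
          · rw [hrest] at hx
            rcases List.mem_append.1 hx with hx | hx
            · exact Or.inl (hrun _ hx)
            · exact Or.inr hx
      · rw [List.map_cons, List.pairwise_cons]
        refine ⟨?_, ih3⟩
        intro x hx
        exact hgt x ((ih2 x).1 hx)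

-- pvRuns of a (≤)-pairwise list names the distinct elements in sorted order with their counts
theorem pv_pvRuns_eq (S : List String) (hp : S.Pairwise (· ≤ ·)) :
    pvRuns S = (PySem.List.sorted (PySem.Set.ofList S) (fun x => x)).map
      (fun k => (k, (S.count k : Int))) := by
  obtain ⟨h1, h2, h3⟩ := pv_pvRuns_char S hp
  have hnodup : ((pvRuns S).map Prod.fst).Nodup := h3.imp ne_of_lt
  have hperm : ((pvRuns S).map Prod.fst).Perm (PySem.Set.ofList S) :=
    (List.perm_ext_iff_of_nodup hnodup (PySem.Set.nodup_ofList S)).2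
      (fun a => by rw [h2 a, PySem.Set.mem_ofList])
  have hsorted : PySem.List.sorted (PySem.Set.ofList S) (fun x => x)
      = (pvRuns S).map Prod.fst :=
    PySem.List.sorted_eq_of_perm_of_pairwise_lt _ _ _ hperm h3
  rw [hsorted, List.map_map]
  conv_lhs => rw [← List.map_id (pvRuns S)]
  apply List.map_congr_left
  intro p hpmem
  simp only [id, Function.comp]
  exact Prod.ext rfl (h1 p hpmem)

-- ===== VERDICT (by name: the statement is the Claim_ definition above) =====
theorem build_category_summary_spec : Claim_equal_build_category_summary := by
  intro f _
  show build_category_summary f = build_category_summary_alt f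
  -- the flattened list of joined keys
  set L : List String := f.flatMap (fun kv => kv.2.map (fun path => PySem.Str.join " > " path)) with hL
  -- A's dict is Counter(L)
  have hdict : f.foldl (fun pc kv =>
      kv.2.foldl (fun pc path =>
        let key := PySem.Str.join " > " path
        pc.insert key (pc.getD key 0 + 1)) pc) PySem.Dict.empty
      = PySem.Dict.counter L := by
    rw [← PySem.Dict.foldl_insert_getD_add_one_eq_counter, hL, List.foldl_flatMap]
    apply PySem.List.foldl_congr_mem
    intro acc kv _
    rw [List.foldl_map]
  -- A's sorted items
  have hitems := PySem.Dict.items_counter L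
  have hinj : ∀ a ∈ (PySem.Dict.counter L).items, ∀ b ∈ (PySem.Dict.counter L).items,
      a.1 = b.1 → a = b := by
    rw [hitems]
    intro a ha b hb hab
    obtain ⟨ka, _, rfl⟩ := List.mem_map.1 ha
    obtain ⟨kb, _, rfl⟩ := List.mem_map.1 hb
    simp only at hab
    subst hab
    rfl
  have hsortA : PySem.List.sorted2 (PySem.Dict.counter L).items (fun p => p.1) (fun p => p.2)
      = (PySem.List.sorted (PySem.Set.ofList L) (fun x => x)).map
          (fun k => (k, (L.count k : Int))) := by
    rw [pv_sorted2_eq_sorted_fst _ hinj]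
    apply PySem.List.sorted_eq_of_perm_of_pairwise_lt
    · rw [hitems]
      exact (PySem.List.sorted_perm (PySem.Set.ofList L) (fun x => x) false).map _
    · rw [List.pairwise_map]
      exact PySem.List.sorted_ofList_pairwise_lt L
  -- B's sorted key list
  set S : List String := PySem.List.sorted L (fun x => x) with hS
  have hSperm : S.Perm L := PySem.List.sorted_perm L (fun x => x) false
  have hSofList : PySem.List.sorted (PySem.Set.ofList S) (fun x => x)
      = PySem.List.sorted (PySem.Set.ofList L) (fun x => x) := by
    apply PySem.List.sorted_eq_sorted_of_perm
    · exact fun a b h => h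
    · exact (List.perm_ext_iff_of_nodup (PySem.Set.nodup_ofList S) (PySem.Set.nodup_ofList L)).2
        (fun a => by rw [PySem.Set.mem_ofList, PySem.Set.mem_ofList, hSperm.mem_iff])
  have hB : pvRuns S = (PySem.List.sorted (PySem.Set.ofList L) (fun x => x)).map
      (fun k => (k, (L.count k : Int))) := by
    rw [pv_pvRuns_eq S (PySem.List.sorted_pairwise L (fun x => x)), hSofList]
    apply List.map_congr_left
    intro k _
    rw [hSperm.count_eq k]
  -- assemble
  show PySem.Str.join "\n" _ = PySem.Str.join "\n" _
  rw [hdict, hsortA, PySem.List.foldl_append_singleton_eq_map, hB, List.nil_append, List.map_map]
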